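-- pv_equiv track=rewrite | github.com/k1m-ch1/programming-files | programming_projects/python/misc/new_file.py | solve
-- ===== SOURCE A (Python) =====
-- def addition(array):
--     total = 0
--     for i in array:
--         total = total + i
--     return total
--
-- def isOdd(x):
--   x = abs(x)
--   if x%2 == 0:
--     return False
--   else:
--     return True
--
-- def solve(arr):
--     result_arr = list()
--     temp_arr = list()
--     temp_num = 0
--     for i in range(len(arr)):
--         difference = abs(len(arr) - i)
--         for j in range(i+1):
--             temp_arr = arr[j:(difference+j)]
--             temp_num = addition(temp_arr)
--             if isOdd(temp_num):
--               result_arr.append(temp_arr)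
--     return result_arr
-- ===== SOURCE B (Python) =====
-- def solve(arr):
--     n = len(arr)
--     # prefix sums: pref[k] = sum of arr[:k]; window parity in O(1)
--     pref = [0]
--     s = 0
--     for v in arr:
--         s += v
--         pref.append(s)
--     out = []
--     for L in range(n, 0, -1):
--         for j in range(n - L + 1):
--             if (pref[j + L] - pref[j]) % 2 == 1:
--                 out.append(arr[j:j + L])
--     return out
-- ===== Notes on version B (the rewrite author's own statement) =====
-- stated objective: alternative
-- what changed: B replaces A's per-window re-summation (addition over every slice) with a prefix-sum table built once, so each window's parity test is a single subtraction; overall cost is dominated by the output's size, so a timing run showed only a constant-factor gain.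
import Mathlib
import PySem

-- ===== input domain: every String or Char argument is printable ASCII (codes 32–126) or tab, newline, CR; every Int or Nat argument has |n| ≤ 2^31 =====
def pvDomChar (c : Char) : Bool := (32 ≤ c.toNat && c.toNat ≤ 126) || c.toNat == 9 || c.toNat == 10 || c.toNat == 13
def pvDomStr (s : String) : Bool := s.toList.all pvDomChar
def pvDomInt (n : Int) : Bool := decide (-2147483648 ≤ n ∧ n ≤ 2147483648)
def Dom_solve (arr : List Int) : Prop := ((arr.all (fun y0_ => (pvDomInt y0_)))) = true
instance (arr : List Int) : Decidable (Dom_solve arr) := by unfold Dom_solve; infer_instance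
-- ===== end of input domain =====

-- B replaces A's per-window re-summation with a prefix-sum table (parity of a window = one subtraction); same output.

-- ===== PORT A =====
def addition (array : List Int) : Int :=
  array.foldl (fun total i => total + i) 0

def isOdd (x : Int) : Bool :=
  if PySem.Int.mod |x| 2 == 0 then false else true

def solve (arr : List Int) : List (List Int) :=
  (PySem.List.pyRange 0 (arr.length : Int) 1).foldl (fun result_arr i =>
    let difference : Int := |(arr.length : Int) - i|
    (PySem.List.pyRange 0 (i + 1) 1).foldl (fun result_arr j =>
      let temp_arr := PySem.List.slice arr (some j) (some (difference + j))
      let temp_num := addition temp_arr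
      if isOdd temp_num then result_arr ++ [temp_arr] else result_arr) result_arr) []

-- ===== PORT B =====
def solve_alt (arr : List Int) : List (List Int) :=
  let n : Int := arr.length
  let pref := (arr.foldl (fun (st : List Int × Int) v => (st.1 ++ [st.2 + v], st.2 + v)) ([0], 0)).1
  (PySem.List.pyRange n 0 (-1)).foldl (fun out L =>
    (PySem.List.pyRange 0 (n - L + 1) 1).foldl (fun out j =>
      if PySem.Int.mod (PySem.List.pyGetD pref (j + L) 0 - PySem.List.pyGetD pref j 0) 2 == 1 then
        out ++ [PySem.List.slice arr (some j) (some (j + L))]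
      else out) out) []

-- ===== PRECONDITION & SPEC =====
def Spec_solve (arr : List Int) (out : List (List Int)) : Prop := out = solve_alt arr
instance (arr : List Int) (out : List (List Int)) : Decidable (Spec_solve arr out) := by unfold Spec_solve; infer_instance

-- ===== CLAIM (what is proved, stated in full; the proofs are below) =====
def Claim_equal_solve : Prop := ∀ (arr : List Int), Dom_solve arr → Spec_solve arr (solve arr)

-- ===== LEMMAS AND PROOFS =====

-- canonical form both ports are reduced to: windows by decreasing length (length arr.length - k), start j left to right
def canonWin (arr : List Int) (k j : Nat) : List Int := (arr.drop j).take (arr.length - k)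

def canon (arr : List Int) : List (List Int) :=
  (List.range arr.length).flatMap (fun k =>
    ((List.range (k + 1)).filter (fun j => ((canonWin arr k j).sum % 2 == 1))).map (canonWin arr k))

theorem addition_eq_sum (l : List Int) : addition l = l.sum := by
  unfold addition
  rw [PySem.List.foldl_add (g := fun x => x)]
  simp

theorem isOdd_eq (t : Int) : isOdd t = (t % 2 == 1) := by
  unfold isOdd
  rw [PySem.Int.mod_eq_emod_of_pos (b := 2) (h := by norm_num)]
  have h2 : |t| % 2 = t % 2 := by
    rcases abs_cases t with ⟨h, _⟩ | ⟨h, _⟩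
    · rw [h]
    · rw [h]; omega
  rw [h2]
  rcases Int.emod_two_eq t with h | h <;> simp [h]

theorem solve_eq_canon (arr : List Int) : solve arr = canon arr := by
  unfold solve
  rw [PySem.List.foldl_congr_mem (PySem.List.pyRange 0 (arr.length : Int) 1) _
    (fun res (i : Int) => res ++
      (((PySem.List.pyRange 0 (i + 1) 1).filter
        (fun j => isOdd (addition (PySem.List.slice arr (some j) (some (|(arr.length : Int) - i| + j)))))).map
        (fun j => PySem.List.slice arr (some j) (some (|(arr.length : Int) - i| + j)))))
    []
    (fun acc x _ => PySem.List.foldl_append_if _ _ _ _)]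
  rw [PySem.List.foldl_append_eq_flatMap, List.nil_append, PySem.List.pyRange_one]
  rw [List.flatMap_map]
  simp only [Int.sub_zero, Int.toNat_natCast]
  apply List.flatMap_congr
  intro k hk
  simp only [List.mem_range] at hk
  have hcast : |(arr.length : Int) - (0 + (k : Int))| = ((arr.length - k : Nat) : Int) := by
    rw [abs_of_nonneg (by omega)]; omega
  simp only [hcast, PySem.List.pyRange_one]
  have h2 : ((0 : Int) + (k : Int) + 1 - 0).toNat = k + 1 := by omega
  rw [h2, List.filter_map, List.map_map]
  congr 1
  · funext j
    simp only [Function.comp]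
    rw [add_comm ((arr.length - k : Nat) : Int) ((0:Int) + (j:Nat)), zero_add,
      PySem.List.slice_natCast_add]
    rfl
  · apply List.filter_congr
    intro j hj
    simp only [Function.comp]
    rw [add_comm ((arr.length - k : Nat) : Int) ((0:Int) + (j:Nat)), zero_add,
      PySem.List.slice_natCast_add, addition_eq_sum, isOdd_eq]
    rfl

theorem pref_fold (l : List Int) (acc : List Int) (s : Int) :
    (l.foldl (fun (st : List Int × Int) v => (st.1 ++ [st.2 + v], st.2 + v)) (acc, s)).1
    = acc ++ (List.range l.length).map (fun t => s + (l.take (t+1)).sum) := by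
  induction l generalizing acc s with
  | nil => simp
  | cons v tl ih =>
    simp only [List.foldl_cons, ih, List.length_cons, List.range_succ_eq_map]
    simp [List.map_map, Function.comp, add_assoc]

theorem pref_eq (arr : List Int) :
    (arr.foldl (fun (st : List Int × Int) v => (st.1 ++ [st.2 + v], st.2 + v)) ([0], 0)).1
    = (List.range (arr.length + 1)).map (fun t => (arr.take t).sum) := by
  rw [pref_fold, List.range_succ_eq_map]
  simp [List.map_map, Function.comp]

theorem pref_get (arr : List Int) (m : Nat) (hm : m ≤ arr.length) :
    PySem.List.pyGetD
      ((arr.foldl (fun (st : List Int × Int) v => (st.1 ++ [st.2 + v], st.2 + v)) ([0], 0)).1)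
      ((m : Nat) : Int) 0 = (arr.take m).sum := by
  rw [pref_eq, PySem.List.pyGetD_natCast, PySem.List.getD_map_range _ _ _ _ (by omega)]

theorem window_sum (arr : List Int) (j m : Nat) :
    (arr.take (j + m)).sum - (arr.take j).sum = ((arr.drop j).take m).sum := by
  rw [List.take_add, List.sum_append]; ring

theorem solve_alt_eq_canon (arr : List Int) : solve_alt arr = canon arr := by
  unfold solve_alt
  rw [PySem.List.foldl_congr_mem (PySem.List.pyRange (arr.length : Int) 0 (-1)) _
    (fun out (L : Int) => out ++
      (((PySem.List.pyRange 0 ((arr.length : Int) - L + 1) 1).filter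
        (fun j => PySem.Int.mod
          (PySem.List.pyGetD ((arr.foldl (fun (st : List Int × Int) v => (st.1 ++ [st.2 + v], st.2 + v)) ([0], 0)).1) (j + L) 0
           - PySem.List.pyGetD ((arr.foldl (fun (st : List Int × Int) v => (st.1 ++ [st.2 + v], st.2 + v)) ([0], 0)).1) j 0) 2 == 1)).map
        (fun j => PySem.List.slice arr (some j) (some (j + L)))))
    []
    (fun acc x _ => PySem.List.foldl_append_if _ _ _ _)]
  rw [PySem.List.foldl_append_eq_flatMap, List.nil_append, PySem.List.pyRange_neg_one]
  rw [List.flatMap_map]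
  simp only [Int.sub_zero, Int.toNat_natCast]
  apply List.flatMap_congr
  intro k hk
  simp only [List.mem_range] at hk
  have hL : (arr.length : Int) - ((arr.length : Int) - (k : Nat)) + 1 = (k : Int) + 1 := by ring
  rw [hL, PySem.List.pyRange_one]
  have h2 : ((k : Int) + 1 - 0).toNat = k + 1 := by omega
  rw [h2, List.filter_map, List.map_map]
  have hLc : (arr.length : Int) - (k : Nat) = ((arr.length - k : Nat) : Int) := by omega
  congr 1
  · funext j
    simp only [Function.comp]
    rw [zero_add, hLc, PySem.List.slice_natCast_add]
    rfl
  · apply List.filter_congr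
    intro j hj
    simp only [List.mem_range] at hj
    simp only [Function.comp]
    rw [zero_add, hLc]
    have hidx : (j : Int) + ((arr.length - k : Nat) : Int) = (((j + (arr.length - k)) : Nat) : Int) := by
      push_cast; ring
    rw [hidx, pref_get arr (j + (arr.length - k)) (by omega), pref_get arr j (by omega),
      window_sum, PySem.Int.mod_eq_emod_of_pos (b := 2) (h := by norm_num)]
    rfl

-- ===== VERDICT (by name: the statement is the Claim_ definition above) =====
theorem solve_spec : Claim_equal_solve := by
  intro arr _
  unfold Spec_solve
  rw [solve_eq_canon, solve_alt_eq_canon]
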